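-- pv_equiv track=rewrite | github.com/bansalshubham257/option-chain-python | index_big_order_db_2.py | build_exchange_chunks
-- ===== SOURCE A (Python) =====
-- MAX_TOKENS_PER_CALL = 50    # AngelOne FULL mode: max 50 tokens per exchange per call
--
-- def group_by_exchange(keys):
--     groups = {}
--     for k in keys:
--         parts = k.split(":", 1)
--         if len(parts) == 2:
--             exch, token = parts
--             groups.setdefault(exch, []).append(token)
--     return groups
--
-- def build_exchange_chunks(all_keys):
--     """Build list of {exchange:[tokens]} where each chunk <= MAX_TOKENS_PER_CALL total."""
--     exchange_groups = group_by_exchange(all_keys)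
--     chunks  = []
--     current = {}
--     count   = 0
--     for exch, tokens in exchange_groups.items():
--         for tok in tokens:
--             current.setdefault(exch, []).append(tok)
--             count += 1
--             if count >= MAX_TOKENS_PER_CALL:
--                 chunks.append(current)
--                 current = {}
--                 count   = 0
--     if current:
--         chunks.append(current)
--     return chunks
-- ===== SOURCE B (Python) =====
-- MAX_TOKENS_PER_CALL = 50
--
--
-- def group_by_exchange(keys):
--     groups = {}
--     for k in keys:
--         parts = k.split(":", 1)
--         if len(parts) == 2:
--             exch, token = parts
--             groups.setdefault(exch, []).append(token)
--     return groups
--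
--
-- def _regroup(block):
--     chunk = {}
--     for exch, tok in block:
--         chunk.setdefault(exch, []).append(tok)
--     return chunk
--
--
-- def build_exchange_chunks(all_keys):
--     """Build list of {exchange:[tokens]} where each chunk <= MAX_TOKENS_PER_CALL total."""
--     groups = group_by_exchange(all_keys)
--     pairs = [(exch, tok) for exch, tokens in groups.items() for tok in tokens]
--     return [_regroup(pairs[i:i + MAX_TOKENS_PER_CALL])
--             for i in range(0, len(pairs), MAX_TOKENS_PER_CALL)]
-- ===== Notes on version B (the rewrite author's own statement) =====
-- stated objective: alternative
-- what changed: Replaces A's accumulate-and-flush loop with a running dict and global counter by flattening the grouped keys into one ordered (exchange, token) list, slicing it into consecutive 50-pair blocks, and regrouping each block into a dict.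
import Mathlib
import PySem

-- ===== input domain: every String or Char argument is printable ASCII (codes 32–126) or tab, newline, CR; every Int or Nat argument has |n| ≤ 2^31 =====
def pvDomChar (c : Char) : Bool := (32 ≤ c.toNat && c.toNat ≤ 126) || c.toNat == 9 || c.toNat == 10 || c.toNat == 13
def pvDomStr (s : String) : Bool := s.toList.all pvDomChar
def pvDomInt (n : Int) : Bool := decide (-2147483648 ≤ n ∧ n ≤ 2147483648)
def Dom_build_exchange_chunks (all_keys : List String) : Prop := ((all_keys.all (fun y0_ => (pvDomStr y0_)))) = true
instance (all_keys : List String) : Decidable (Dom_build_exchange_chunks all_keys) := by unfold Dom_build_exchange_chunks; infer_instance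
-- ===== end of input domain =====

-- B re-implements A's accumulate-and-flush chunking as flatten-into-(exchange,token)-pairs, slice
-- into consecutive 50-pair blocks, regroup each block; same return value (objective: alternative).

def MAX_TOKENS_PER_CALL : Int := 50

-- groups.setdefault(exch, []).append(tok)
def sdApp (d : PySem.Dict String (List String)) (e t : String) : PySem.Dict String (List String) :=
  d.modify e [] (fun l => l ++ [t])

-- shared module helper group_by_exchange (used verbatim by both A and B)
def group_by_exchange (keys : List String) : PySem.Dict String (List String) :=
  keys.foldl (fun g k =>
    let parts := (PySem.Str.splitMax? k ":" 1).getD []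
    if parts.length = 2 then sdApp g (parts.getD 0 "") (parts.getD 1 "") else g)
    PySem.Dict.empty

-- ===== PORT A =====
-- loop body of A: state = (chunks, current, count)
def buildStep (st : List (PySem.Dict String (List String)) × PySem.Dict String (List String) × Int)
    (p : String × String) :
    List (PySem.Dict String (List String)) × PySem.Dict String (List String) × Int :=
  let cur := sdApp st.2.1 p.1 p.2
  let cnt := st.2.2 + 1
  if cnt ≥ MAX_TOKENS_PER_CALL then (st.1 ++ [cur], PySem.Dict.empty, 0) else (st.1, cur, cnt)

def build_exchange_chunks (all_keys : List String) : List (List (String × List String)) :=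
  let exchange_groups := group_by_exchange all_keys
  let st := exchange_groups.items.foldl
    (fun st et => et.2.foldl (fun st tok => buildStep st (et.1, tok)) st)
    ([], PySem.Dict.empty, 0)
  let chunks := if st.2.1.items = [] then st.1 else st.1 ++ [st.2.1]  -- "if current:" truthiness
  chunks.map (·.items)

-- ===== PORT B =====
-- helper _regroup(block): dict built with setdefault over the block
def regroup (block : List (String × String)) : PySem.Dict String (List String) :=
  block.foldl (fun c p => sdApp c p.1 p.2) PySem.Dict.empty

def build_exchange_chunks_alt (all_keys : List String) : List (List (String × List String)) :=
  let groups := group_by_exchange all_keys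
  let pairs := groups.items.flatMap (fun et => et.2.map (fun tok => (et.1, tok)))
  ((PySem.List.pyRange 0 (pairs.length : Int) MAX_TOKENS_PER_CALL).map
    (fun i => regroup (PySem.List.slice pairs (some i) (some (i + MAX_TOKENS_PER_CALL))))).map (·.items)

-- ===== PRECONDITION & SPEC =====
def Spec_build_exchange_chunks (all_keys : List String) (out : List (List (String × List String))) : Prop := out = build_exchange_chunks_alt all_keys
instance (all_keys : List String) (out : List (List (String × List String))) : Decidable (Spec_build_exchange_chunks all_keys out) := by unfold Spec_build_exchange_chunks; infer_instance

-- ===== CLAIM (what is proved, stated in full; the proofs are below) =====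
def Claim_equal_build_exchange_chunks : Prop := ∀ (all_keys : List String), Dom_build_exchange_chunks all_keys → Spec_build_exchange_chunks all_keys (build_exchange_chunks all_keys)

-- ===== LEMMAS AND PROOFS =====

-- consecutive 50-blocks of a list (proof-side characterisation of both chunkings)
def chunksRec (l : List (String × String)) : List (List (String × String)) :=
  if h : l = [] then [] else l.take 50 :: chunksRec (l.drop 50)
termination_by l.length
decreasing_by
  have : 0 < l.length := List.length_pos_iff.mpr h
  simp only [List.length_drop]; omega

theorem chunksRec_nil : chunksRec [] = [] := by
  unfold chunksRec; simp

theorem chunksRec_ne (l : List (String × String)) (h : l ≠ []) :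
    chunksRec l = l.take 50 :: chunksRec (l.drop 50) := by
  rw [chunksRec]; simp [h]

theorem foldl_nested {σ : Type} (f : σ → String × String → σ)
    (items : List (String × List String)) (s : σ) :
    items.foldl (fun s et => et.2.foldl (fun s tok => f s (et.1, tok)) s) s
      = (items.flatMap (fun et => et.2.map (fun tok => (et.1, tok)))).foldl f s := by
  induction items generalizing s with
  | nil => rfl
  | cons et rest ih => simp only [List.flatMap_cons, List.foldl_append, List.foldl_map,
      List.foldl_cons, ih]

theorem sdApp_items_ne (d : PySem.Dict String (List String)) (e t : String) :
    (sdApp d e t).items ≠ [] := by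
  intro h
  have hmem : e ∈ (sdApp d e t).keys := by
    rw [sdApp, PySem.Dict.keys_modify]
    simp [PySem.Dict.mem_keys_insert]
  rw [PySem.Dict.keys, h] at hmem
  simp at hmem

theorem foldl_sdApp_ne (bs : List (String × String)) (d : PySem.Dict String (List String))
    (h : d.items ≠ []) : (bs.foldl (fun c p => sdApp c p.1 p.2) d).items ≠ [] := by
  induction bs generalizing d with
  | nil => exact h
  | cons b bs ih => exact ih _ (sdApp_items_ne _ _ _)

theorem regroup_items_nil_iff (b : List (String × String)) :
    (regroup b).items = [] ↔ b = [] := by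
  constructor
  · intro h
    cases b with
    | nil => rfl
    | cons p bs =>
      exact absurd h (by
        simpa [regroup] using foldl_sdApp_ne bs (sdApp PySem.Dict.empty p.1 p.2)
          (sdApp_items_ne _ _ _))
  · rintro rfl; rfl

theorem regroup_snoc (acc : List (String × String)) (p : String × String) :
    regroup (acc ++ [p]) = sdApp (regroup acc) p.1 p.2 := by
  simp [regroup, List.foldl_append]

theorem loopA_eq (pairs : List (String × String)) :
    ∀ (acc : List (String × String)) (chunks : List (PySem.Dict String (List String))),
    acc.length < 50 →
    (let st := pairs.foldl buildStep (chunks, regroup acc, (acc.length : Int))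
     if st.2.1.items = [] then st.1 else st.1 ++ [st.2.1])
      = chunks ++ (chunksRec (acc ++ pairs)).map regroup := by
  induction pairs with
  | nil =>
    intro acc chunks hlen
    simp only [List.foldl_nil, List.append_nil]
    by_cases hacc : acc = []
    · subst hacc
      simp [chunksRec_nil, regroup_items_nil_iff]
    · rw [chunksRec_ne acc hacc,
        List.take_of_length_le (by omega), List.drop_eq_nil_of_le (by omega), chunksRec_nil]
      simp [(regroup_items_nil_iff acc).not.mpr hacc]
  | cons p ps ih =>
    intro acc chunks hlen
    simp only [List.foldl_cons]
    have hstep : buildStep (chunks, regroup acc, (acc.length : Int)) p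
        = if (acc.length : Int) + 1 ≥ MAX_TOKENS_PER_CALL
          then (chunks ++ [regroup (acc ++ [p])], PySem.Dict.empty, 0)
          else (chunks, regroup (acc ++ [p]), (acc.length : Int) + 1) := by
      simp [buildStep, regroup_snoc]
    rw [hstep]
    by_cases hfull : (acc.length : Int) + 1 ≥ MAX_TOKENS_PER_CALL
    · rw [if_pos hfull]
      have h49 : acc.length = 49 := by
        simp only [MAX_TOKENS_PER_CALL] at hfull; omega
      have := ih [] (chunks ++ [regroup (acc ++ [p])]) (by simp)
      simp only [List.length_nil, Int.natCast_zero, List.nil_append] at this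
      rw [show (regroup [] : PySem.Dict String (List String)) = PySem.Dict.empty from rfl] at this
      rw [this]
      have hlen50 : (acc ++ [p]).length = 50 := by simp [h49]
      have hsplit : acc ++ p :: ps = (acc ++ [p]) ++ ps := by simp
      rw [hsplit, chunksRec_ne ((acc ++ [p]) ++ ps) (by simp),
        List.take_left' hlen50, List.drop_left' hlen50]
      simp
    · rw [if_neg hfull]
      have hlt : (acc ++ [p]).length < 50 := by
        simp only [MAX_TOKENS_PER_CALL] at hfull; simp; omega
      have := ih (acc ++ [p]) chunks hlt
      simp only [List.length_append, List.length_cons, List.length_nil] at this ⊢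
      rw [show ((acc.length : Int) + 1) = ((acc.length + 1 : Nat) : Int) by push_cast; ring]
      simpa using this

theorem pyRange50_cons (n m : Nat) (h0 : 0 < n) (hm : m = n - 50) :
    PySem.List.pyRange 0 (n : Int) 50
      = 0 :: (PySem.List.pyRange 0 (m : Int) 50).map (· + 50) := by
  rw [PySem.List.pyRange_of_pos _ _ (by norm_num),
    PySem.List.pyRange_of_pos _ _ (by norm_num)]
  have hcount : (if (0 : Int) < (n : Int) then ((((n : Int)) - 0 + 50 - 1) / 50).toNat else 0)
      = (if (0 : Int) < (m : Int) then ((((m : Int)) - 0 + 50 - 1) / 50).toNat else 0) + 1 := by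
    split_ifs with h1 h2 <;> omega
  rw [hcount, List.range_succ_eq_map]
  simp only [List.map_cons, List.map_map]
  rw [List.cons_eq_cons]
  refine ⟨by norm_num, ?_⟩
  apply List.map_congr_left
  intro k _
  simp only [Function.comp_apply]
  push_cast
  ring

theorem slice_shift (pairs : List (String × String)) (i : Int) (hi : 0 ≤ i) :
    PySem.List.slice pairs (some (i + 50)) (some (i + 50 + 50))
      = PySem.List.slice (pairs.drop 50) (some i) (some (i + 50)) := by
  have h1 : PySem.List.slice pairs (some (i + 50)) (some (i + 50 + 50))
      = List.take ((i + 50 + 50).toNat - (i + 50).toNat) (List.drop (i + 50).toNat pairs) :=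
    PySem.List.slice_toNat pairs (by omega) (by omega)
  have h2 : PySem.List.slice (pairs.drop 50) (some i) (some (i + 50))
      = List.take ((i + 50).toNat - i.toNat) (List.drop i.toNat (pairs.drop 50)) :=
    PySem.List.slice_toNat _ hi (by omega)
  rw [h1, h2, List.drop_drop]
  have e1 : (i + 50 + 50).toNat - (i + 50).toNat = (i + 50).toNat - i.toNat := by omega
  have e2 : (i + 50).toNat = i.toNat + 50 := by omega
  rw [e1, e2, Nat.add_comm 50 i.toNat]

theorem altB_aux : ∀ (n : Nat) (pairs : List (String × String)), pairs.length ≤ n →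
    (PySem.List.pyRange 0 (pairs.length : Int) 50).map
      (fun i => regroup (PySem.List.slice pairs (some i) (some (i + 50))))
      = (chunksRec pairs).map regroup := by
  intro n
  induction n with
  | zero =>
    intro pairs h
    have : pairs = [] := by
      cases pairs with
      | nil => rfl
      | cons a l => simp only [List.length_cons] at h; omega
    subst this
    simp [chunksRec_nil, PySem.List.pyRange]
  | succ n ih =>
    intro pairs h
    by_cases hnil : pairs = []
    · subst hnil; simp [chunksRec_nil, PySem.List.pyRange]
    · have hpos : 0 < pairs.length := List.length_pos_iff.mpr hnil
      rw [pyRange50_cons pairs.length (pairs.drop 50).length hpos (by simp)]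
      rw [chunksRec_ne _ hnil]
      simp only [List.map_cons, List.map_map]
      congr 1
      · congr 1
        rw [PySem.List.slice_toNat (a := 0) (b := 0 + 50) pairs le_rfl (by norm_num)]
        norm_num
        omega
      · rw [← ih (pairs.drop 50) (by simp only [List.length_drop]; omega)]
        apply List.map_congr_left
        intro i himem
        have hi : 0 ≤ i :=
          (((PySem.List.mem_pyRange_iff_of_pos (by norm_num) i).mp himem)).1
        simp only [Function.comp_apply]
        rw [slice_shift pairs i hi]

theorem build_eq_chunks (all_keys : List String) :
    build_exchange_chunks all_keys = build_exchange_chunks_alt all_keys := by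
  simp only [build_exchange_chunks, build_exchange_chunks_alt]
  rw [foldl_nested buildStep]
  have hA := loopA_eq
    ((group_by_exchange all_keys).items.flatMap (fun et => et.2.map (fun tok => (et.1, tok))))
    [] [] (by simp)
  simp only [List.length_nil, Int.natCast_zero, List.nil_append] at hA
  rw [show (regroup [] : PySem.Dict String (List String)) = PySem.Dict.empty from rfl] at hA
  rw [hA]
  rw [show MAX_TOKENS_PER_CALL = 50 from rfl]
  rw [altB_aux _ _ le_rfl]

-- ===== VERDICT (by name: the statement is the Claim_ definition above) =====
theorem build_exchange_chunks_spec : Claim_equal_build_exchange_chunks := by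
  intro all_keys _
  unfold Spec_build_exchange_chunks
  exact build_eq_chunks all_keys
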